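-- pv_equiv track=rewrite | github.com/fut33v/wattattack_script | krutilkavnbot/bot.py | _match_favorite_bike_id
-- ===== SOURCE A (Python) =====
-- from typing import Any, Awaitable, Callable, Dict, Final, List, Optional, Tuple
--
-- def _match_favorite_bike_id(favorite_raw: Optional[str], bikes_map: Dict[int, Dict[str, Any]]) -> Optional[int]:
--     if not favorite_raw:
--         return None
--     needle = favorite_raw.strip().lower()
--     if not needle:
--         return None
--
--     exact_matches: List[int] = []
--     partial_matches: List[int] = []
--
--     for bike_id, bike in bikes_map.items():
--         title = (bike.get("title") or "").strip().lower()
--         owner = (bike.get("owner") or "").strip().lower()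
--         if title == needle or owner == needle:
--             exact_matches.append(bike_id)
--         elif needle in title or (owner and needle in owner):
--             partial_matches.append(bike_id)
--
--     if exact_matches:
--         return exact_matches[0]
--     if partial_matches:
--         return partial_matches[0]
--     return None
-- ===== SOURCE B (Python) =====
-- from typing import Any, Dict, Optional
--
--
-- def _match_favorite_bike_id(favorite_raw: Optional[str], bikes_map: Dict[int, Dict[str, Any]]) -> Optional[int]:
--     if not favorite_raw:
--         return None
--     needle = favorite_raw.strip().lower()
--     if not needle:
--         return None
--
--     # First pass: return the first exact match immediately.
--     for bike_id, bike in bikes_map.items():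
--         title = (bike.get("title") or "").strip().lower()
--         owner = (bike.get("owner") or "").strip().lower()
--         if title == needle or owner == needle:
--             return bike_id
--
--     # No exact match: return the first partial match, if any.
--     for bike_id, bike in bikes_map.items():
--         title = (bike.get("title") or "").strip().lower()
--         owner = (bike.get("owner") or "").strip().lower()
--         if needle in title or (owner and needle in owner):
--             return bike_id
--
--     return None
-- ===== Notes on version B (the rewrite author's own statement) =====
-- stated objective: simpler
-- what changed: Replaced the single accumulate-two-lists pass (exact_matches/partial_matches built in full, then inspected) with two early-returning scans: first scan returns the first exact match immediately, a second scan runs only if none exists and returns the first partial match.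
import Mathlib
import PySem

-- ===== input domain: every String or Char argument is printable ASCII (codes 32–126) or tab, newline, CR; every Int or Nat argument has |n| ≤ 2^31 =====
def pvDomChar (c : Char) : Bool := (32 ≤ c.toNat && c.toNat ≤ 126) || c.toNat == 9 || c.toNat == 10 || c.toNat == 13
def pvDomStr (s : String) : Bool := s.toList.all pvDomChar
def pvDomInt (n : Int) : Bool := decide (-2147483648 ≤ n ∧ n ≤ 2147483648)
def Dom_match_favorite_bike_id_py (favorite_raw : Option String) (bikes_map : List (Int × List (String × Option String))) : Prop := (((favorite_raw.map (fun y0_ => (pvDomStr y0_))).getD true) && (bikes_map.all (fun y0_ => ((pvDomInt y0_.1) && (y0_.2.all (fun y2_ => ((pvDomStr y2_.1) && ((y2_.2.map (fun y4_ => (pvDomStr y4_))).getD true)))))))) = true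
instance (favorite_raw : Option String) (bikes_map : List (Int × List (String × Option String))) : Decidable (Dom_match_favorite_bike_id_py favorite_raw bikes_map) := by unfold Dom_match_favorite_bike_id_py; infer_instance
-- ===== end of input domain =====

-- B replaces A's accumulate-both-lists pass by two early-returning scans (first exact, then partial); objective: simpler.

-- helpers shared by both ports: both Pythons compute title/owner and the two
-- match predicates by the SAME expressions, so they are factored out here.
-- (bike.get(k) or "").strip().lower()
def pvField (bike : List (String × Option String)) (k : String) : String :=
  PySem.Str.lower (PySem.Str.strip ((((PySem.Dict.mk bike).get? k).join).getD ""))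

-- title == needle or owner == needle
def pvExact (needle : String) (bike : List (String × Option String)) : Bool :=
  pvField bike "title" == needle || pvField bike "owner" == needle

-- needle in title or (owner and needle in owner)
def pvPartial (needle : String) (bike : List (String × Option String)) : Bool :=
  PySem.Str.isIn needle (pvField bike "title") ||
    (!(pvField bike "owner" == "") && PySem.Str.isIn needle (pvField bike "owner"))

-- ===== PORT A =====
-- A's loop body: append to exact_matches / partial_matches
def pvStepA (needle : String) (acc : List Int × List Int)
    (b : Int × List (String × Option String)) : List Int × List Int :=
  if pvExact needle b.2 then (acc.1 ++ [b.1], acc.2)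
  else if pvPartial needle b.2 then (acc.1, acc.2 ++ [b.1])
  else acc

def match_favorite_bike_id_py (favorite_raw : Option String) (bikes_map : List (Int × List (String × Option String))) : Option Int :=
  match favorite_raw with
  | none => none
  | some raw =>
    if raw = "" then none
    else
      let needle := PySem.Str.lower (PySem.Str.strip raw)
      if needle = "" then none
      else
        let r := bikes_map.foldl (pvStepA needle) ([], [])
        match r.1 with
        | x :: _ => some x
        | [] =>
          match r.2 with
          | y :: _ => some y
          | [] => none

-- ===== PORT B =====
def match_favorite_bike_id_py_alt (favorite_raw : Option String) (bikes_map : List (Int × List (String × Option String))) : Option Int :=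
  match favorite_raw with
  | none => none
  | some raw =>
    if raw = "" then none
    else
      let needle := PySem.Str.lower (PySem.Str.strip raw)
      if needle = "" then none
      else
        match bikes_map.find? (fun b => pvExact needle b.2) with
        | some b => some b.1
        | none =>
          match bikes_map.find? (fun b => pvPartial needle b.2) with
          | some b => some b.1
          | none => none

-- ===== PRECONDITION & SPEC =====
def Spec_match_favorite_bike_id_py (favorite_raw : Option String) (bikes_map : List (Int × List (String × Option String))) (out : Option Int) : Prop := out = match_favorite_bike_id_py_alt favorite_raw bikes_map
instance (favorite_raw : Option String) (bikes_map : List (Int × List (String × Option String))) (out : Option Int) : Decidable (Spec_match_favorite_bike_id_py favorite_raw bikes_map out) := by unfold Spec_match_favorite_bike_id_py; infer_instance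

-- ===== CLAIM (what is proved, stated in full; the proofs are below) =====
def Claim_equal_match_favorite_bike_id_py : Prop := ∀ (favorite_raw : Option String) (bikes_map : List (Int × List (String × Option String))), Dom_match_favorite_bike_id_py favorite_raw bikes_map → Spec_match_favorite_bike_id_py favorite_raw bikes_map (match_favorite_bike_id_py favorite_raw bikes_map)

-- ===== LEMMAS AND PROOFS =====

-- A's loop produces exactly the exact/partial filters, appended to the accumulators
lemma pv_loop_eq (needle : String) (bikes : List (Int × List (String × Option String)))
    (e p : List Int) :
    List.foldl (pvStepA needle) (e, p) bikes =
      (e ++ (bikes.filter (fun b => pvExact needle b.2)).map Prod.fst,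
       p ++ (bikes.filter (fun b => !pvExact needle b.2 && pvPartial needle b.2)).map Prod.fst) := by
  induction bikes generalizing e p with
  | nil => simp
  | cons b t ih =>
    by_cases h1 : pvExact needle b.2 <;> by_cases h2 : pvPartial needle b.2 <;>
      simp [pvStepA, List.filter_cons, h1, h2, ih]

lemma pv_head?_filter_map {α : Type} (q : α → Bool) (f : α → Int) (l : List α) :
    ((l.filter q).map f).head? = (l.find? q).map f := by
  induction l with
  | nil => rfl
  | cons a t ih =>
    by_cases h : q a <;> simp [List.filter_cons, List.find?_cons, h, ih]

-- ===== VERDICT (by name: the statement is the Claim_ definition above) =====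
theorem match_favorite_bike_id_py_spec : Claim_equal_match_favorite_bike_id_py := by
  intro favorite_raw bikes_map _hdom
  unfold Spec_match_favorite_bike_id_py match_favorite_bike_id_py match_favorite_bike_id_py_alt
  cases favorite_raw with
  | none => rfl
  | some raw =>
    by_cases hraw : raw = ""
    · simp [hraw]
    · simp only [hraw, if_false]
      set needle := PySem.Str.lower (PySem.Str.strip raw) with hn
      by_cases hne : needle = ""
      · simp [hne]
      · simp only [hne, if_false]
        rw [pv_loop_eq]
        simp only [List.nil_append]
        cases hfe : bikes_map.find? (fun b => pvExact needle b.2) with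
        | some b =>
          have := pv_head?_filter_map (fun b => pvExact needle b.2) Prod.fst bikes_map
          rw [hfe] at this
          cases hfl : (bikes_map.filter (fun b => pvExact needle b.2)).map Prod.fst with
          | nil => rw [hfl] at this; simp at this
          | cons x xs => rw [hfl] at this; simp at this; simp [this]
        | none =>
          cases hfl : (bikes_map.filter (fun b => pvExact needle b.2)).map Prod.fst with
          | cons x xs =>
            have := pv_head?_filter_map (fun b => pvExact needle b.2) Prod.fst bikes_map
            rw [hfe, hfl] at this; simp at this
          | nil =>
            -- no exact match anywhere, so the !exact conjunct is vacuous
            have hnone : ∀ b ∈ bikes_map, pvExact needle b.2 = false := by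
              intro b hb
              simpa using List.find?_eq_none.mp hfe b hb
            have hfilter :
                bikes_map.filter (fun b => !pvExact needle b.2 && pvPartial needle b.2) =
                bikes_map.filter (fun b => pvPartial needle b.2) := by
              apply List.filter_congr
              intro b hb
              simp [hnone b hb]
            rw [hfilter]
            have := pv_head?_filter_map (fun b => pvPartial needle b.2) Prod.fst bikes_map
            cases hfp : bikes_map.find? (fun b => pvPartial needle b.2) with
            | some b =>
              rw [hfp] at this
              cases hfl2 : (bikes_map.filter (fun b => pvPartial needle b.2)).map Prod.fst with
              | nil => rw [hfl2] at this; simp at this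
              | cons y ys => rw [hfl2] at this; simp at this; simp [this]
            | none =>
              rw [hfp] at this
              cases hfl2 : (bikes_map.filter (fun b => pvPartial needle b.2)).map Prod.fst with
              | nil => simp
              | cons y ys => rw [hfl2] at this; simp at this
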